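-- pv_equiv track=rewrite | github.com/dnishiyama/wiktionary_scraper | ety_utils.py | make_temp_code
-- ===== SOURCE A (Python) =====
-- def make_temp_code(row, bad_words):
--     temp_codes = []
--     for word in row['parsed_etymology'].split(' '):
--         if word in ['from', 'From', '<']:
--             temp_codes.append('f')
--         elif word == ',':
--             temp_codes.append('c')
--         elif word == ':':
--             temp_codes.append(':')
--         elif word == '+' or word == 'and':
--             temp_codes.append('+')
--         elif word == '(' or word == '[':
--             temp_codes.append('(')
--         elif word == ')' or word == ']':
--             temp_codes.append(')')
--         elif word == ';' or word == '.':
--             temp_codes.append('.')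
--         elif word == 'or' or word == '/':
--             temp_codes.append('or/')
--         elif word.replace('\'', '') in bad_words:
--             temp_codes.append('b')
--         else:
--             temp_codes.append('-')
--     return temp_codes
-- ===== SOURCE B (Python) =====
-- _TABLE = [
--     ('from', 'f'), ('From', 'f'), ('<', 'f'),
--     (',', 'c'),
--     (':', ':'),
--     ('+', '+'), ('and', '+'),
--     ('(', '('), ('[', '('),
--     (')', ')'), (']', ')'),
--     (';', '.'), ('.', '.'),
--     ('or', 'or/'), ('/', 'or/'),
-- ]
--
-- def make_temp_code(row, bad_words):
--     # token-major stamping: start from the fallback codes, then for each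
--     # literal token overwrite the code at every position where it occurs
--     words = row['parsed_etymology'].split(' ')
--     codes = ['b' if w.replace("'", '') in bad_words else '-' for w in words]
--     for tok, code in _TABLE:
--         for i, w in enumerate(words):
--             if w == tok:
--                 codes[i] = code
--     return codes
-- ===== Notes on version B (the rewrite author's own statement) =====
-- stated objective: alternative
-- what changed: Inverts the traversal: instead of dispatching each word through an eight-branch elif chain, B first computes the bad_words/'-' fallback for every position, then iterates token-major over the 16 literal tokens and stamps their code at every index where that token occurs, building the output by positional overwriting.
import Mathlib
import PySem

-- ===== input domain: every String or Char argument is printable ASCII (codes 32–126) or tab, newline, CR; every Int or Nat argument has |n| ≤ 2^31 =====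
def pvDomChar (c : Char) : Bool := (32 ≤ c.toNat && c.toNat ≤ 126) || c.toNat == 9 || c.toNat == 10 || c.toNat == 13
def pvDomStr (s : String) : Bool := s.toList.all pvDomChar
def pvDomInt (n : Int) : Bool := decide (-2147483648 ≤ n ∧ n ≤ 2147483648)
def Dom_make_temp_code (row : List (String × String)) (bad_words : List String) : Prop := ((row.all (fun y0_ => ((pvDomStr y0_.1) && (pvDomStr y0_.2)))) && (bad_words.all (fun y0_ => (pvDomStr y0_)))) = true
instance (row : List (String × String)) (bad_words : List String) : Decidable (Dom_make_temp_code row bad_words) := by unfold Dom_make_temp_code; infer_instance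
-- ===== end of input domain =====

-- B inverts the traversal: it computes the bad_words/'-' fallback code per position first,
-- then loops token-major over the 16 literal tokens stamping their code at every matching index.

-- ===== PORT A =====
-- the elif chain of A, branch for branch
def pvStepA (bad_words : List String) (word : String) : String :=
  if word ∈ (["from", "From", "<"] : List String) then "f"
  else if word = "," then "c"
  else if word = ":" then ":"
  else if word = "+" ∨ word = "and" then "+"
  else if word = "(" ∨ word = "[" then "("
  else if word = ")" ∨ word = "]" then ")"
  else if word = ";" ∨ word = "." then "."
  else if word = "or" ∨ word = "/" then "or/"
  else if (PySem.Str.replace word "'" "") ∈ bad_words then "b"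
  else "-"

def make_temp_code (row : List (String × String)) (bad_words : List String) : List String :=
  match (PySem.Dict.mk row).get? "parsed_etymology" with
  | none => []  -- Python raises KeyError here; excluded by Pre_
  | some s =>
      ((PySem.Str.split? s " ").getD []).foldl (fun temp_codes word => temp_codes ++ [pvStepA bad_words word]) []

-- ===== PORT B =====
def pvTABLE : List (String × String) :=
  [("from", "f"), ("From", "f"), ("<", "f"), (",", "c"), (":", ":"),
   ("+", "+"), ("and", "+"), ("(", "("), ("[", "("), (")", ")"), ("]", ")"),
   (";", "."), (".", "."), ("or", "or/"), ("/", "or/")]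

-- the inner 'for i, w in enumerate(words): if w == tok: codes[i] = code' pass
def pvStamp (words codes : List String) (tok code : String) : List String :=
  (words.zip codes).map (fun q => if q.1 = tok then code else q.2)

def make_temp_code_alt (row : List (String × String)) (bad_words : List String) : List String :=
  match (PySem.Dict.mk row).get? "parsed_etymology" with
  | none => []  -- Python raises KeyError here; excluded by Pre_
  | some s =>
      let words := (PySem.Str.split? s " ").getD []
      let codes := words.map (fun w => if (PySem.Str.replace w "'" "") ∈ bad_words then "b" else "-")
      pvTABLE.foldl (fun codes p => pvStamp words codes p.1 p.2) codes

-- ===== PRECONDITION & SPEC =====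
-- Pre_ excludes exactly the rows with no 'parsed_etymology' key, on which Python A raises KeyError.
def Pre_make_temp_code (row : List (String × String)) (bad_words : List String) : Prop :=
  "parsed_etymology" ∈ row.map Prod.fst
instance (row : List (String × String)) (bad_words : List String) : Decidable (Pre_make_temp_code row bad_words) := by unfold Pre_make_temp_code; infer_instance

def pvWitness_make_temp_code : (List (String × String)) × List String :=
  ([("parsed_etymology", "from cat , dog")], ["cat"])

def Spec_make_temp_code (row : List (String × String)) (bad_words : List String) (out : List String) : Prop := out = make_temp_code_alt row bad_words
instance (row : List (String × String)) (bad_words : List String) (out : List String) : Decidable (Spec_make_temp_code row bad_words out) := by unfold Spec_make_temp_code; infer_instance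

-- ===== CLAIM (what is proved, stated in full; the proofs are below) =====
def Claim_equal_make_temp_code : Prop := ∀ (row : List (String × String)) (bad_words : List String), Dom_make_temp_code row bad_words → Pre_make_temp_code row bad_words → Spec_make_temp_code row bad_words (make_temp_code row bad_words)

-- ===== LEMMAS AND PROOFS =====
-- one stamping pass over codes that are a map of the words is a map with an updated function
theorem pvStamp_map (words : List String) (f : String → String) (tok code : String) :
    pvStamp words (words.map f) tok code
      = words.map (fun w => if w = tok then code else f w) := by
  induction words with
  | nil => rfl
  | cons w ws ih => simp [pvStamp, List.zip] at ih ⊢; exact ih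

-- folding stamping passes over any table keeps the codes a map of the words
theorem pvFold_stamp (table : List (String × String)) (words : List String) (f : String → String) :
    table.foldl (fun codes p => pvStamp words codes p.1 p.2) (words.map f)
      = words.map (table.foldl (fun g p w => if w = p.1 then p.2 else g w) f) := by
  induction table generalizing f with
  | nil => rfl
  | cons p t ih => simp only [List.foldl_cons, pvStamp_map]; exact ih _

-- per-word: the fully stamped function agrees with A's elif chain
set_option maxHeartbeats 1000000 in
theorem pvStep_agree (bad_words : List String) (word : String) :
    pvStepA bad_words word
      = pvTABLE.foldl (fun g p w => if w = p.1 then p.2 else g w)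
          (fun w => if (PySem.Str.replace w "'" "") ∈ bad_words then "b" else "-") word := by
  by_cases h1 : word = "from"
  · subst h1; rfl
  by_cases h2 : word = "From"
  · subst h2; rfl
  by_cases h3 : word = "<"
  · subst h3; rfl
  by_cases h4 : word = ","
  · subst h4; rfl
  by_cases h5 : word = ":"
  · subst h5; rfl
  by_cases h6 : word = "+"
  · subst h6; rfl
  by_cases h7 : word = "and"
  · subst h7; rfl
  by_cases h8 : word = "("
  · subst h8; rfl
  by_cases h9 : word = "["
  · subst h9; rfl
  by_cases h10 : word = ")"
  · subst h10; rfl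
  by_cases h11 : word = "]"
  · subst h11; rfl
  by_cases h12 : word = ";"
  · subst h12; rfl
  by_cases h13 : word = "."
  · subst h13; rfl
  by_cases h14 : word = "or"
  · subst h14; rfl
  by_cases h15 : word = "/"
  · subst h15; rfl
  simp [pvStepA, pvTABLE, List.foldl, h1, h2, h3, h4, h5, h6, h7, h8, h9, h10, h11, h12, h13, h14, h15]

-- ===== VERDICT (by name: the statement is the Claim_ definition above) =====
theorem make_temp_code_spec : Claim_equal_make_temp_code := by
  intro row bad_words _ _
  unfold Spec_make_temp_code make_temp_code make_temp_code_alt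
  cases (PySem.Dict.mk row).get? "parsed_etymology" with
  | none => rfl
  | some s =>
      simp only []
      rw [PySem.List.foldl_append_singleton_eq_map, pvFold_stamp]
      exact List.map_congr_left (fun w _ => pvStep_agree bad_words w)
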